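-- pv_equiv track=rewrite | github.com/tymoorej/BlackJackBot | Classes.py | offset_sum
-- ===== SOURCE A (Python) =====
-- def offset_sum(cards):
--     total=0
--     for c in cards:
--         if c < 11:
--             total+=c
--         elif c == 15:
--             total+=11
--         else:
--             total+=10
--     return total
-- ===== SOURCE B (Python) =====
-- def offset_sum(cards):
--     cards = list(cards)
--     return sum(min(c, 10) for c in cards) + cards.count(15)
-- ===== Notes on version B (the rewrite author's own statement) =====
-- stated objective: simpler
-- what changed: Replaced the branching accumulation loop with a closed formula: sum of min(c,10) over the list plus the count of 15s (a 15 contributes 11 = 10 + 1).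
import Mathlib
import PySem

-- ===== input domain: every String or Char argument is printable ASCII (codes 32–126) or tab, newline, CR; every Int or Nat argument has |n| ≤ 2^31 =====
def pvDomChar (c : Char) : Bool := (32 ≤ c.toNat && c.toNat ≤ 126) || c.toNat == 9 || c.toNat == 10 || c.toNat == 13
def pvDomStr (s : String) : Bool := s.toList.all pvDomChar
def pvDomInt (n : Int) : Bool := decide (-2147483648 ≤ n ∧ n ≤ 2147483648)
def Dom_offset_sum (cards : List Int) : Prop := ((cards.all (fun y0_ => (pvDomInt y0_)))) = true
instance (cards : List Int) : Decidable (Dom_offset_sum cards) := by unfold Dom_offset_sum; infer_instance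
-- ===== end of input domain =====

-- B replaces A's branching accumulation loop with clamped sum + count of 15s (objective: simpler).


-- ===== PORT A =====
def offset_sum (cards : List Int) : Int :=
  cards.foldl (fun total c =>
    if c < 11 then total + c
    else if c == 15 then total + 11
    else total + 10) 0

-- ===== PORT B =====
def offset_sum_alt (cards : List Int) : Int :=
  (cards.map (fun c => min c 10)).sum + PySem.List.count cards 15

-- ===== PRECONDITION & SPEC =====
def Spec_offset_sum (cards : List Int) (out : Int) : Prop := out = offset_sum_alt cards
instance (cards : List Int) (out : Int) : Decidable (Spec_offset_sum cards out) := by unfold Spec_offset_sum; infer_instance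

-- ===== CLAIM (what is proved, stated in full; the proofs are below) =====
def Claim_equal_offset_sum : Prop := ∀ (cards : List Int), Dom_offset_sum cards → Spec_offset_sum cards (offset_sum cards)

-- ===== LEMMAS AND PROOFS =====
theorem offset_sum_shift (cards : List Int) (a : Int) :
    cards.foldl (fun total c =>
      if c < 11 then total + c
      else if c == 15 then total + 11
      else total + 10) a
    = a + (cards.map (fun c => min c 10)).sum + PySem.List.count cards 15 := by
  induction cards generalizing a with
  | nil => simp [PySem.List.count]
  | cons x xs ih =>
    simp only [List.foldl_cons, List.map_cons, List.sum_cons, ih,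
      PySem.List.count, List.count_cons]
    by_cases h15 : x = 15
    · subst h15; simp; push_cast; ring
    · have hb : ¬ ((x : Int) == 15) = true := by simpa using h15
      by_cases h : x < 11
      · simp [h, h15]; omega
      · simp [h, hb]; omega

-- ===== VERDICT (by name: the statement is the Claim_ definition above) =====
theorem offset_sum_spec : Claim_equal_offset_sum := by
  intro cards _
  unfold Spec_offset_sum offset_sum offset_sum_alt
  rw [offset_sum_shift]
  ring
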